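-- pv_equiv track=rewrite | github.com/laidbackGuy/Algorithm | 프로그래머스/2/340212. ［PCCP 기출문제］ 2번 ／ 퍼즐 게임 챌린지/［PCCP 기출문제］ 2번 ／ 퍼즐 게임 챌린지.py | solution
-- ===== SOURCE A (Python) =====
-- def solution(diffs, times, lm):
--     answer = 0
--     N = len(diffs)
--
--
--     def check(lv, limit):
--         time_prev = 0
--         for i in range(N):
--             diff = diffs[i]
--             time_cur = times[i]
--
--             if diff > lv:
--                 limit -= ((diff - lv) * (time_prev + time_cur)) + time_cur
--             else:
--                 limit -= time_cur
--
--             if limit < 0: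
--                 return False
--
--             time_prev = time_cur
--
--         return True
--
--
--     left, right = 1, max(diffs)
--     while left <= right:
--         mid = (left+right)//2
--
--         if check(mid, lm):
--             right = mid - 1
--         else:
--             left = mid + 1
--
--     answer = left
--
--     return answer
-- ===== SOURCE B (Python) =====
-- # B: sort the (diff, prev+cur weight) pairs once, prefix sums + hand-rolled bisect give each
-- # check in O(log n) inside the binary search on the level (A rescans all stages per probe).
--
-- def solution(diffs, times, lm):
--     n = len(diffs)
--     ts = times[:n]
--     total = sum(ts)
--
--     pairs = []
--     prev = 0
--     for d, t in zip(diffs, ts):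
--         pairs.append((d, prev + t))
--         prev = t
--     pairs.sort(key=lambda p: p[0])
--
--     ds = [d for d, _ in pairs]
--     ws = [w for _, w in pairs]
--     dws = [d * w for d, w in pairs]
--
--     def prefix(l):
--         out = [0]
--         for y in l:
--             out.append(out[-1] + y)
--         return out
--
--     pw = prefix(ws)
--     pdw = prefix(dws)
--
--     def bisect_right(a, x):
--         lo, hi = 0, len(a)
--         while lo < hi:
--             mid = (lo + hi) // 2
--             if a[mid] <= x:
--                 lo = mid + 1
--             else:
--                 hi = mid
--         return lo
--
--     def cost(lv):
--         k = bisect_right(ds, lv)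
--         return total + (pdw[n] - pdw[k]) - lv * (pw[n] - pw[k])
--
--     left, right = 1, max(diffs)
--     while left <= right:
--         mid = (left + right) // 2
--         if cost(mid) <= lm:
--             right = mid - 1
--         else:
--             left = mid + 1
--     return left
-- ===== Notes on version B (the rewrite author's own statement) =====
-- stated objective: faster
-- what changed: B sorts the (difficulty, prev+cur time) pairs once and precomputes prefix sums of w and d*w, so each probe of the binary search on the level is answered by a hand-rolled bisect in O(log n) instead of A's O(n) early-exit rescan of all stages.
-- outside the precondition, e.g. on solution([1, 1], [-4, -4], -5): A returns 2, B returns 1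
import Mathlib
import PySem

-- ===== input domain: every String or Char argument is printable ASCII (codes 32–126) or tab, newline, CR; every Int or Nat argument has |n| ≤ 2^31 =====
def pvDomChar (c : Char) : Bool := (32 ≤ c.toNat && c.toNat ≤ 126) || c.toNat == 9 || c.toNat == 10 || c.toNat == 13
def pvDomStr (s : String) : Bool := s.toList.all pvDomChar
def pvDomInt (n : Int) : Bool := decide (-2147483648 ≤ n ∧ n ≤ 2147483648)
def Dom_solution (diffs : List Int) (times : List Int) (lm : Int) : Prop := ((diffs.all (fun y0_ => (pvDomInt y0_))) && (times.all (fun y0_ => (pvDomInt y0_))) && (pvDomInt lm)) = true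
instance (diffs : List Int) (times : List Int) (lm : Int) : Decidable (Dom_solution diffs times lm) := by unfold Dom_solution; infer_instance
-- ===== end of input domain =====

-- B replaces A's O(n) early-exit scan per probe by a sorted pair list with prefix sums and a
-- hand-rolled bisect, making each probe of the binary search O(log n).

-- ===== PORT A =====
-- check(lv, limit): for i in range(N) with early return False; the .getD 0 marks the
-- IndexError case (times shorter than diffs), excluded by Pre_.
def solutionCheckLoop (diffs times : List Int) (lv : Int) (limit tp : Int) : List Int → Bool
  | [] => true
  | i :: rest =>
    let diff := (PySem.List.pyGet? diffs i).getD 0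
    let tc := (PySem.List.pyGet? times i).getD 0
    let limit' := if diff > lv then limit - ((diff - lv) * (tp + tc) + tc) else limit - tc
    if limit' < 0 then false else solutionCheckLoop diffs times lv limit' tc rest

def solutionCheck (diffs times : List Int) (lv limit : Int) : Bool :=
  solutionCheckLoop diffs times lv limit 0 (PySem.List.pyRange 0 (diffs.length : Int) 1)

def solutionSearch (diffs times : List Int) (lm left right : Int) : Int :=
  if h : left ≤ right then
    let mid := PySem.Int.floordiv (left + right) 2
    if solutionCheck diffs times mid lm then
      solutionSearch diffs times lm left (mid - 1)
    else
      solutionSearch diffs times lm (mid + 1) right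
  else left
termination_by (right + 1 - left).toNat
decreasing_by
  · have hb := PySem.Int.floordiv_two_mid_bounds h; omega
  · have hb := PySem.Int.floordiv_two_mid_bounds h; omega

-- max(diffs) raises ValueError on []: excluded by Pre_ (the .getD 0 is never the value there)
def solution (diffs : List Int) (times : List Int) (lm : Int) : Int :=
  solutionSearch diffs times lm 1 ((PySem.List.max? diffs (fun y => y)).getD 0)

-- ===== PORT B =====
-- pairs built with a running prev: [(d, prev + t)]
def solutionAltPairs (prev : Int) : List (Int × Int) → List (Int × Int)
  | [] => []
  | (d, t) :: rest => (d, prev + t) :: solutionAltPairs t rest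

-- prefix(l): out = [0]; out.append(out[-1] + y)
def solutionAltPrefix (acc : Int) : List Int → List Int
  | [] => [acc]
  | y :: rest => acc :: solutionAltPrefix (acc + y) rest

-- hand-rolled bisect_right (Source B may not import bisect)
def solutionAltBisectLoop (a : List Int) (x : Int) (lo hi : Nat) : Nat :=
  if _h : lo < hi then
    let mid := (lo + hi) / 2
    if a.getD mid 0 ≤ x then solutionAltBisectLoop a x (mid + 1) hi
    else solutionAltBisectLoop a x lo mid
  else lo
termination_by hi - lo
decreasing_by
  · omega
  · omega

def solutionAltCost (n : Nat) (total : Int) (ds pw pdw : List Int) (lv : Int) : Int :=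
  let k := solutionAltBisectLoop ds lv 0 ds.length
  total + (pdw.getD n 0 - pdw.getD k 0) - lv * (pw.getD n 0 - pw.getD k 0)

def solutionAltSearch (n : Nat) (total : Int) (ds pw pdw : List Int) (lm left right : Int) : Int :=
  if h : left ≤ right then
    let mid := PySem.Int.floordiv (left + right) 2
    if solutionAltCost n total ds pw pdw mid ≤ lm then
      solutionAltSearch n total ds pw pdw lm left (mid - 1)
    else
      solutionAltSearch n total ds pw pdw lm (mid + 1) right
  else left
termination_by (right + 1 - left).toNat
decreasing_by
  · have hb := PySem.Int.floordiv_two_mid_bounds h; omega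
  · have hb := PySem.Int.floordiv_two_mid_bounds h; omega

def solution_alt (diffs : List Int) (times : List Int) (lm : Int) : Int :=
  let n := diffs.length
  let ts := PySem.List.slice times none (some (n : Int))
  let total := ts.sum
  let pairs := PySem.List.sorted (solutionAltPairs 0 (diffs.zip ts)) Prod.fst false
  let ds := pairs.map Prod.fst
  let ws := pairs.map Prod.snd
  let dws := pairs.map (fun p => p.1 * p.2)
  let pw := solutionAltPrefix 0 ws
  let pdw := solutionAltPrefix 0 dws
  solutionAltSearch n total ds pw pdw lm 1 ((PySem.List.max? diffs (fun y => y)).getD 0)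

-- ===== PRECONDITION & SPEC =====
-- Pre_ restricts to the puzzle's natural domain: nonempty diffs (max([]) raises in A), times at
-- least as long as diffs (times[i] raises in A otherwise), and nonnegative play times — with
-- several stages and a negative play time A's early-exit check can reject a level whose total
-- time is within the limit, an accident of its implementation (the two cases where negative
-- times cannot reach that accident, a single stage or no stage above level 1, stay inside Pre_).
def Pre_solution (diffs : List Int) (times : List Int) (lm : Int) : Prop :=
  diffs ≠ [] ∧ diffs.length ≤ times.length ∧
    ((∀ t ∈ times.take diffs.length, 0 ≤ t) ∨ diffs.length = 1 ∨ ∀ d ∈ diffs, d ≤ 0)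
instance (diffs : List Int) (times : List Int) (lm : Int) : Decidable (Pre_solution diffs times lm) := by unfold Pre_solution; infer_instance

def pvWitness_solution : List Int × List Int × Int := ([2, 3, 1], [10, 20, 5], 60)

def Spec_solution (diffs : List Int) (times : List Int) (lm : Int) (out : Int) : Prop := out = solution_alt diffs times lm
instance (diffs : List Int) (times : List Int) (lm : Int) (out : Int) : Decidable (Spec_solution diffs times lm out) := by unfold Spec_solution; infer_instance

-- ===== CLAIM (what is proved, stated in full; the proofs are below) =====
def Claim_equal_solution : Prop := ∀ (diffs : List Int) (times : List Int) (lm : Int), Dom_solution diffs times lm → Pre_solution diffs times lm → Spec_solution diffs times lm (solution diffs times lm)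

-- ===== LEMMAS AND PROOFS =====

-- A's per-stage increment, run over (diff, time) pairs instead of indices
def pvCheckPairs (lv limit tp : Int) : List (Int × Int) → Bool
  | [] => true
  | (d, t) :: rest =>
    let limit' := if d > lv then limit - ((d - lv) * (tp + t) + t) else limit - t
    if limit' < 0 then false else pvCheckPairs lv limit' t rest

def pvPairCost (lv tp : Int) : List (Int × Int) → Int
  | [] => 0
  | (d, t) :: rest => (if d > lv then (d - lv) * (tp + t) + t else t) + pvPairCost lv t rest

def pvPen (lv : Int) (l : List (Int × Int)) : Int :=
  (l.map (fun p => if p.1 > lv then (p.1 - lv) * p.2 else 0)).sum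

lemma pvPairCost_nonneg (lv tp : Int) (q : List (Int × Int)) (htp : 0 ≤ tp)
    (hq : ∀ p ∈ q, 0 ≤ p.2) : 0 ≤ pvPairCost lv tp q := by
  induction q generalizing tp with
  | nil => simp [pvPairCost]
  | cons p rest ih =>
    obtain ⟨d, t⟩ := p
    have ht : 0 ≤ t := hq (d, t) (by simp)
    have hrest := ih t ht (fun p hp => hq p (List.mem_cons_of_mem _ hp))
    simp only [pvPairCost]
    have : 0 ≤ (if d > lv then (d - lv) * (tp + t) + t else t) := by
      split_ifs with h
      · nlinarith
      · exact ht
    linarith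

lemma pvCheckPairs_eq (lv limit tp : Int) (q : List (Int × Int)) (htp : 0 ≤ tp)
    (hq : ∀ p ∈ q, 0 ≤ p.2) :
    pvCheckPairs lv limit tp q = if q = [] then true else decide (pvPairCost lv tp q ≤ limit) := by
  induction q generalizing limit tp with
  | nil => simp [pvCheckPairs]
  | cons p rest ih =>
    obtain ⟨d, t⟩ := p
    have ht : 0 ≤ t := hq (d, t) (by simp)
    have hrest : ∀ p ∈ rest, 0 ≤ p.2 := fun p hp => hq p (List.mem_cons_of_mem _ hp)
    have hcost : 0 ≤ pvPairCost lv t rest := pvPairCost_nonneg lv t rest ht hrest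
    set c : Int := if d > lv then (d - lv) * (tp + t) + t else t with hc
    have hc0 : 0 ≤ c := by
      rw [hc]; split_ifs with h
      · nlinarith
      · exact ht
    simp only [pvCheckPairs, pvPairCost, ← hc]
    rw [show (if d > lv then limit - ((d - lv) * (tp + t) + t) else limit - t) = limit - c by
      rw [hc]; split_ifs <;> ring]
    by_cases hlt : limit - c < 0
    · simp only [if_pos hlt]
      have : ¬ (c + pvPairCost lv t rest ≤ limit) := by linarith
      simp [this]
    · simp only [if_neg hlt]
      rw [ih (limit - c) t ht hrest]
      by_cases hr : rest = []
      · subst hr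
        simp only [pvPairCost]
        simp
        linarith
      · simp only [if_neg hr, if_neg (by simp : ¬ ((d, t) :: rest = []))]
        rw [decide_eq_decide]
        constructor <;> intro h <;> linarith

lemma pvBridge (diffs times : List Int) (lv : Int)
    (hlen : diffs.length ≤ times.length) :
    ∀ (k : Nat) (limit tp : Int),
      solutionCheckLoop diffs times lv limit tp
        (PySem.List.pyRange ((diffs.length - k : Nat) : Int) (diffs.length : Int) 1)
      = pvCheckPairs lv limit tp
          ((diffs.zip (times.take diffs.length)).drop (diffs.length - k)) := by
  have hql : (diffs.zip (times.take diffs.length)).length = diffs.length := by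
    simp [List.length_zip]
    omega
  intro k
  induction k with
  | zero =>
    intro limit tp
    rw [Nat.sub_zero, PySem.List.pyRange_one_eq_nil (le_refl _), List.drop_of_length_le (by omega)]
    simp [solutionCheckLoop, pvCheckPairs]
  | succ k ih =>
    intro limit tp
    by_cases hk : diffs.length ≤ k
    · rw [show diffs.length - (k + 1) = diffs.length - k by omega]
      exact ih limit tp
    · set i : Nat := diffs.length - (k + 1) with hi
      have hiN : i < diffs.length := by omega
      have hit : i < times.length := by omega
      have hcons : PySem.List.pyRange ((i : Nat) : Int) (diffs.length : Int) 1
          = ((i : Nat) : Int) :: PySem.List.pyRange (((i : Nat) : Int) + 1) (diffs.length : Int) 1 :=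
        PySem.List.pyRange_one_cons (by exact_mod_cast hiN)
      have hgd : (PySem.List.pyGet? diffs ((i : Nat) : Int)).getD 0 = diffs[i] := by
        rw [PySem.List.pyGet?_natCast, List.getElem?_eq_getElem hiN, Option.getD_some]
      have hgt : (PySem.List.pyGet? times ((i : Nat) : Int)).getD 0 = times[i] := by
        rw [PySem.List.pyGet?_natCast, List.getElem?_eq_getElem hit, Option.getD_some]
      have hdrop : (diffs.zip (times.take diffs.length)).drop i
          = (diffs[i], times[i]) :: (diffs.zip (times.take diffs.length)).drop (i + 1) := by
        rw [List.drop_eq_getElem_cons (by omega)]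
        congr 1
        rw [List.getElem_zip]
        congr 1
        exact List.getElem_take
      rw [hcons, hdrop]
      simp only [solutionCheckLoop, pvCheckPairs, hgd, hgt]
      have hnext : (((i : Nat) : Int) + 1) = (((i + 1 : Nat)) : Int) := by push_cast; ring
      have hstep : (i + 1 : Nat) = diffs.length - k := by omega
      by_cases hneg : (if diffs[i] > lv then limit - ((diffs[i] - lv) * (tp + times[i]) + times[i]) else limit - times[i]) < 0
      · rw [if_pos hneg, if_pos hneg]
      · rw [if_neg hneg, if_neg hneg, hnext, hstep]
        exact ih _ _

lemma pvPairCost_decomp (lv : Int) (q : List (Int × Int)) :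
    ∀ tp, pvPairCost lv tp q = (q.map Prod.snd).sum + pvPen lv (solutionAltPairs tp q) := by
  induction q with
  | nil => intro tp; simp [pvPairCost, solutionAltPairs, pvPen]
  | cons p rest ih =>
    intro tp
    obtain ⟨d, t⟩ := p
    simp only [pvPairCost, solutionAltPairs, pvPen, List.map_cons, List.sum_cons]
    rw [ih t]
    simp only [pvPen]
    split_ifs with h <;> ring

lemma pvPrefix_getD (l : List Int) : ∀ (a : Int) (k : Nat), k ≤ l.length →
    (solutionAltPrefix a l).getD k 0 = a + (l.take k).sum := by
  induction l with
  | nil =>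
    intro a k hk
    have : k = 0 := by simpa using hk
    subst this; simp [solutionAltPrefix]
  | cons y rest ih =>
    intro a k hk
    cases k with
    | zero => simp [solutionAltPrefix]
    | succ k =>
      simp only [solutionAltPrefix, List.getD_cons_succ, List.take_succ_cons, List.sum_cons]
      rw [ih (a + y) k (by simpa using hk)]
      ring

lemma pvBisect_spec (a : List Int) (x : Int) (hp : a.Pairwise (· ≤ ·)) :
    ∀ (lo hi : Nat), lo ≤ hi → hi ≤ a.length →
      (∀ j, j < lo → ∀ (hj : j < a.length), a[j] ≤ x) →
      (∀ j, hi ≤ j → ∀ (hj : j < a.length), x < a[j]) →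
      solutionAltBisectLoop a x lo hi ≤ a.length ∧
      (∀ j, j < solutionAltBisectLoop a x lo hi → ∀ (hj : j < a.length), a[j] ≤ x) ∧
      (∀ j, solutionAltBisectLoop a x lo hi ≤ j → ∀ (hj : j < a.length), x < a[j]) := by
  have hmono := List.pairwise_iff_getElem.mp hp
  have H : ∀ (n lo hi : Nat), hi - lo ≤ n → lo ≤ hi → hi ≤ a.length →
      (∀ j, j < lo → ∀ (hj : j < a.length), a[j] ≤ x) →
      (∀ j, hi ≤ j → ∀ (hj : j < a.length), x < a[j]) →
      solutionAltBisectLoop a x lo hi ≤ a.length ∧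
      (∀ j, j < solutionAltBisectLoop a x lo hi → ∀ (hj : j < a.length), a[j] ≤ x) ∧
      (∀ j, solutionAltBisectLoop a x lo hi ≤ j → ∀ (hj : j < a.length), x < a[j]) := by
    intro n
    induction n with
    | zero =>
      intro lo hi hn hle hlen hlow hhigh
      have hEq : lo = hi := by omega
      rw [solutionAltBisectLoop, dif_neg (by omega)]
      exact ⟨by omega, hlow, fun j hj => hhigh j (by omega)⟩
    | succ n ih =>
      intro lo hi hn hle hlen hlow hhigh
      rw [solutionAltBisectLoop]
      by_cases hlt : lo < hi
      · rw [dif_pos hlt]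
        simp only []
        have hmid1 : lo ≤ (lo + hi) / 2 := by omega
        have hmid2 : (lo + hi) / 2 < hi := by omega
        have hmlen : (lo + hi) / 2 < a.length := by omega
        rw [List.getD_eq_getElem a 0 hmlen]
        by_cases hcmp : a[(lo + hi) / 2] ≤ x
        · rw [if_pos hcmp]
          refine ih ((lo + hi) / 2 + 1) hi (by omega) (by omega) hlen ?_ hhigh
          intro j hj hj'
          rcases Nat.lt_or_ge j ((lo + hi) / 2) with h' | h'
          · exact le_trans (hmono j ((lo + hi) / 2) hj' hmlen h') hcmp
          · have : j = (lo + hi) / 2 := by omega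
            subst this; exact hcmp
        · rw [if_neg hcmp]
          refine ih lo ((lo + hi) / 2) (by omega) (by omega) (by omega) hlow ?_
          intro j hj hj'
          rw [not_le] at hcmp
          rcases Nat.lt_or_ge ((lo + hi) / 2) j with h' | h'
          · exact lt_of_lt_of_le hcmp (hmono ((lo + hi) / 2) j hmlen hj' h')
          · have : j = (lo + hi) / 2 := by omega
            subst this; exact hcmp
      · rw [dif_neg hlt]
        exact ⟨by omega, hlow, fun j hj => hhigh j (by omega)⟩
  intro lo hi hle hlen hlow hhigh
  exact H (hi - lo) lo hi (le_refl _) hle hlen hlow hhigh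

-- sum of the pen over a block all of whose firsts are ≤ lv is 0
lemma pvPen_le_zero (lv : Int) (l : List (Int × Int)) (h : ∀ p ∈ l, p.1 ≤ lv) :
    pvPen lv l = 0 := by
  unfold pvPen
  apply List.sum_eq_zero
  intro x hx
  simp only [List.mem_map] at hx
  obtain ⟨p, hp, rfl⟩ := hx
  simp [not_lt.mpr (h p hp)]

lemma pvPen_gt (lv : Int) (l : List (Int × Int)) (h : ∀ p ∈ l, lv < p.1) :
    pvPen lv l = (l.map (fun p => p.1 * p.2)).sum - lv * (l.map Prod.snd).sum := by
  induction l with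
  | nil => simp [pvPen]
  | cons p rest ih =>
    obtain ⟨d, t⟩ := p
    have hd : lv < d := h (d, t) (by simp)
    simp only [pvPen, List.map_cons, List.sum_cons] at *
    rw [if_pos (by exact hd)]
    rw [ih (fun p hp => h p (by simp [hp]))]
    ring

lemma pvPen_append (lv : Int) (l₁ l₂ : List (Int × Int)) :
    pvPen lv (l₁ ++ l₂) = pvPen lv l₁ + pvPen lv l₂ := by
  simp [pvPen]

lemma pvAltPairs_length (prev : Int) (q : List (Int × Int)) :
    (solutionAltPairs prev q).length = q.length := by
  induction q generalizing prev with
  | nil => simp [solutionAltPairs]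
  | cons p rest ih =>
    obtain ⟨d, t⟩ := p
    simp [solutionAltPairs, ih]

-- on a nonempty pair list the early-exit loop decides the total cost; with one stage this
-- needs no sign condition
lemma pvCheckPairs_eq_total (lv limit : Int) (q : List (Int × Int)) (hne : q ≠ [])
    (hok : (∀ p ∈ q, 0 ≤ p.2) ∨ q.length = 1) :
    pvCheckPairs lv limit 0 q = decide (pvPairCost lv 0 q ≤ limit) := by
  rcases hok with h | h
  · rw [pvCheckPairs_eq lv limit 0 q (le_refl 0) h, if_neg hne]
  · match q, h with
    | [(d, t)], _ =>
      simp only [pvCheckPairs, pvPairCost]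
      by_cases hneg : (if d > lv then limit - ((d - lv) * (0 + t) + t) else limit - t) < 0
      · rw [if_pos hneg]
        symm
        simp only [decide_eq_false_iff_not, not_le]
        split_ifs at hneg ⊢ with hd <;> linarith
      · rw [if_neg hneg]
        symm
        simp only [decide_eq_true_eq]
        split_ifs at hneg ⊢ with hd <;> linarith

-- the key pointwise equality of the two probe predicates
lemma pvCheck_eq_cost (diffs times : List Int) (lm : Int)
    (hne : diffs ≠ []) (hlen : diffs.length ≤ times.length)
    (hok : (∀ t ∈ times.take diffs.length, 0 ≤ t) ∨ diffs.length = 1) (lv : Int) :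
    solutionCheck diffs times lv lm
      = decide (solutionAltCost diffs.length (PySem.List.slice times none (some (diffs.length : Int))).sum
          ((PySem.List.sorted (solutionAltPairs 0 (diffs.zip (PySem.List.slice times none (some (diffs.length : Int))))) Prod.fst false).map Prod.fst)
          (solutionAltPrefix 0 ((PySem.List.sorted (solutionAltPairs 0 (diffs.zip (PySem.List.slice times none (some (diffs.length : Int))))) Prod.fst false).map Prod.snd))
          (solutionAltPrefix 0 ((PySem.List.sorted (solutionAltPairs 0 (diffs.zip (PySem.List.slice times none (some (diffs.length : Int))))) Prod.fst false).map (fun p => p.1 * p.2)))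
          lv ≤ lm) := by
  have hslice : PySem.List.slice times none (some ((diffs.length : Nat) : Int))
      = times.take diffs.length := PySem.List.slice_to_natCast times diffs.length
  rw [hslice]
  -- abbreviations
  have htsl : (times.take diffs.length).length = diffs.length := by simp; omega
  have hQl : (diffs.zip (times.take diffs.length)).length = diffs.length := by
    simp [htsl]
  -- A side: the index loop is the pair loop, which decides the total cost
  have hA : solutionCheck diffs times lv lm
      = pvCheckPairs lv lm 0 (diffs.zip (times.take diffs.length)) := by
    have hb := pvBridge diffs times lv hlen diffs.length lm 0
    rw [Nat.sub_self] at hb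
    simpa [solutionCheck, List.drop_zero] using hb
  have hQpos : (∀ p ∈ diffs.zip (times.take diffs.length), 0 ≤ p.2)
      ∨ (diffs.zip (times.take diffs.length)).length = 1 := by
    rcases hok with h | h
    · exact Or.inl (fun p hp => h p.2 (List.of_mem_zip hp).2)
    · exact Or.inr (hQl.trans h)
  have hQne : diffs.zip (times.take diffs.length) ≠ [] := by
    intro h
    apply hne
    have := hQl
    rw [h] at this
    cases diffs with
    | nil => rfl
    | cons a l => simp at this
  rw [hA, pvCheckPairs_eq_total lv lm _ hQne hQpos]
  rw [decide_eq_decide]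
  -- name the B-side data
  set P : List (Int × Int) := solutionAltPairs 0 (diffs.zip (times.take diffs.length)) with hP
  set sp : List (Int × Int) := PySem.List.sorted P Prod.fst false with hsp
  set ds : List Int := sp.map Prod.fst with hds
  set ws : List Int := sp.map Prod.snd with hws
  set dws : List Int := sp.map (fun p => p.1 * p.2) with hdws
  have hPl : P.length = diffs.length := by
    rw [hP, pvAltPairs_length]
    exact hQl
  have hspl : sp.length = diffs.length := by
    rw [hsp, PySem.List.length_sorted]
    exact hPl
  have hdsl : ds.length = diffs.length := by simp [hds, hspl]
  have hwsl : ws.length = diffs.length := by simp [hws, hspl]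
  have hdwsl : dws.length = diffs.length := by simp [hdws, hspl]
  -- bisect
  set k : Nat := solutionAltBisectLoop ds lv 0 ds.length with hk
  have hbs := pvBisect_spec ds lv (by rw [hds, hsp]; exact PySem.List.sorted_map_key_pairwise P Prod.fst)
      0 ds.length (by omega) (le_refl _) (by omega) (by omega)
  rw [← hk] at hbs
  obtain ⟨hkle, hlow, hhigh⟩ := hbs
  have hkN : k ≤ diffs.length := by omega
  -- prefix-sum reads
  have hpdwN : (solutionAltPrefix 0 dws).getD diffs.length 0 = dws.sum := by
    rw [pvPrefix_getD dws 0 diffs.length (by omega), List.take_of_length_le (by omega)]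
    ring
  have hpdwk : (solutionAltPrefix 0 dws).getD k 0 = (dws.take k).sum := by
    rw [pvPrefix_getD dws 0 k (by omega)]; ring
  have hpwN : (solutionAltPrefix 0 ws).getD diffs.length 0 = ws.sum := by
    rw [pvPrefix_getD ws 0 diffs.length (by omega), List.take_of_length_le (by omega)]
    ring
  have hpwk : (solutionAltPrefix 0 ws).getD k 0 = (ws.take k).sum := by
    rw [pvPrefix_getD ws 0 k (by omega)]; ring
  -- pen over the sorted list splits at k
  have htake : ∀ p ∈ sp.take k, p.1 ≤ lv := by
    intro p hp
    rw [List.mem_take_iff_getElem] at hp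
    obtain ⟨j, hj, he⟩ := hp
    have hjk : j < k := by omega
    simpa [hds, List.getElem_map, he] using hlow j hjk (by omega)
  have hdrop : ∀ p ∈ sp.drop k, lv < p.1 := by
    intro p hp
    rw [List.mem_iff_getElem] at hp
    obtain ⟨j, hj, he⟩ := hp
    have hj' : k + j < sp.length := by
      have := List.length_drop (l := sp) (i := k)
      omega
    rw [List.getElem_drop] at he
    simpa [hds, List.getElem_map, he] using hhigh (k + j) (by omega) (by omega)
  have hpen : pvPen lv sp = (dws.drop k).sum - lv * (ws.drop k).sum := by
    conv_lhs => rw [← List.take_append_drop k sp]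
    rw [pvPen_append, pvPen_le_zero lv _ htake, pvPen_gt lv _ hdrop]
    rw [hdws, hws, List.map_drop, List.map_drop]
    ring
  -- assemble both values
  have hcostA : pvPairCost lv 0 (diffs.zip (times.take diffs.length))
      = (times.take diffs.length).sum + pvPen lv sp := by
    rw [pvPairCost_decomp, List.map_snd_zip (by omega)]
    congr 1
    exact (List.Perm.sum_eq (List.Perm.map _ (PySem.List.sorted_perm P Prod.fst false))).symm
  have hsum1 : (dws.take k).sum + (dws.drop k).sum = dws.sum := List.sum_take_add_sum_drop dws k
  have hsum2 : (ws.take k).sum + (ws.drop k).sum = ws.sum := List.sum_take_add_sum_drop ws k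
  rw [hcostA, hpen]
  unfold solutionAltCost
  simp only []
  rw [← hk, hpdwN, hpdwk, hpwN, hpwk]
  have hEq : (times.take diffs.length).sum + ((dws.drop k).sum - lv * (ws.drop k).sum)
      = (times.take diffs.length).sum + (dws.sum - (dws.take k).sum)
        - lv * ((solutionAltPrefix 0 ws).getD diffs.length 0 - (ws.take k).sum) := by
    rw [hpwN]
    rw [show dws.sum - (dws.take k).sum = (dws.drop k).sum by linarith,
        show ws.sum - (ws.take k).sum = (ws.drop k).sum by linarith]
    ring
  rw [hEq, hpwN]

lemma pvSearch_eq (diffs times : List Int) (lm : Int) (n : Nat) (total : Int)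
    (ds pw pdw : List Int)
    (hpt : ∀ lv, solutionCheck diffs times lv lm = decide (solutionAltCost n total ds pw pdw lv ≤ lm)) :
    ∀ (left right : Int),
      solutionSearch diffs times lm left right = solutionAltSearch n total ds pw pdw lm left right := by
  intro left right
  fun_induction solutionSearch diffs times lm left right with
  | case1 left right h mid hchk ih =>
    rw [solutionAltSearch, dif_pos h]
    have hd := hpt mid
    rw [if_pos (of_decide_eq_true (hd.symm.trans hchk))]
    exact ih
  | case2 left right h mid hchk ih =>
    rw [solutionAltSearch, dif_pos h]
    have hd := hpt mid
    rw [if_neg (fun hle => hchk (hd.trans (decide_eq_true hle)))]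
    exact ih
  | case3 left right h =>
    rw [solutionAltSearch, dif_neg h]

-- ===== VERDICT (by name: the statement is the Claim_ definition above) =====
theorem solution_spec : Claim_equal_solution := by
  intro diffs times lm _hdom hpre
  obtain ⟨hne, hlen, hdisj⟩ := hpre
  rcases hdisj with hts | hone | hnonpos
  · unfold Spec_solution solution solution_alt
    exact (pvSearch_eq diffs times lm _ _ _ _ _
      (fun lv => pvCheck_eq_cost diffs times lm hne hlen (Or.inl hts) lv) 1 _).symm ▸ rfl
  · unfold Spec_solution solution solution_alt
    exact (pvSearch_eq diffs times lm _ _ _ _ _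
      (fun lv => pvCheck_eq_cost diffs times lm hne hlen (Or.inr hone) lv) 1 _).symm ▸ rfl
  · -- no stage above level 1: both binary searches return 1 at once
    have hm : (PySem.List.max? diffs (fun y => y)).getD 0 ≤ 0 := by
      cases hmax : PySem.List.max? diffs (fun y => y) with
      | none => simp
      | some m =>
        simpa using hnonpos m (PySem.List.max?_mem hmax)
    unfold Spec_solution solution solution_alt
    simp only []
    rw [solutionSearch, dif_neg (by omega), solutionAltSearch, dif_neg (by omega)]
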